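-- pv_equiv track=rewrite | github.com/TapasCodeLab/DSA_Problems_Python | Leetcode/Leetcode_3160_Find_the_Number_of_Distinct_Colors_Among_the_Balls.py | queryResults
-- ===== SOURCE A (Python) =====
-- from typing import List
--
-- def queryResults(limit: int, queries: List[List[int]]) -> List[int]:
--     res = []
--     balls, colors = {},{}
--     for ball, color in queries:
--         if ball in balls:
--             old_color = balls[ball]
--             balls[ball] = color
--             colors[color] = colors.get(color,0)+1
--             colors[old_color] = colors.get(old_color)-1
--             if colors[old_color] == 0:
--                 del colors[old_color]
--         else:
--             balls[ball] = color
--             colors[color] = colors.get(color,0)+1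
--         res.append(len(colors))
--     return res
-- ===== SOURCE B (Python) =====
-- from typing import List
--
-- def queryResults(limit: int, queries: List[List[int]]) -> List[int]:
--     # Recompute the distinct-color count from the ball assignments each query,
--     # instead of incrementally maintaining a color->count map.
--     balls = {}
--     res = []
--     for ball, color in queries:
--         balls[ball] = color
--         res.append(len(set(balls.values())))
--     return res
-- ===== Notes on version B (the rewrite author's own statement) =====
-- stated objective: simpler
-- what changed: B drops the incremental color->count map with its increment/decrement/delete bookkeeping and recomputes the distinct-color count by scanning the current ball assignments (len(set(balls.values()))) after each query.
import Mathlib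
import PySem

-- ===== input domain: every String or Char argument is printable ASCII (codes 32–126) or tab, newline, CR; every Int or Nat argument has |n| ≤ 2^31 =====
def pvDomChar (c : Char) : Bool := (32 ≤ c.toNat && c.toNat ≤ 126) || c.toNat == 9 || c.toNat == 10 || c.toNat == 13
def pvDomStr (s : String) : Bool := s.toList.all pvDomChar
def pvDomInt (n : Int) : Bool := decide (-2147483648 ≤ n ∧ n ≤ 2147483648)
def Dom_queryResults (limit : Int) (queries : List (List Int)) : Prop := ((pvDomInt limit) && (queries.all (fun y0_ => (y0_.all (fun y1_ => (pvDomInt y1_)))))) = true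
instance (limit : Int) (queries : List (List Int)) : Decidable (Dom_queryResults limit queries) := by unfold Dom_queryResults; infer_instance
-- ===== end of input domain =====

-- B replaces A's incrementally maintained color->count dict (with its increment/decrement/delete
-- bookkeeping) by recomputing the distinct-color count from the ball assignments each query: simpler.

-- ===== PORT A =====
-- loop body of A, over the state (balls, colors, res)
def pvStepA (st : PySem.Dict Int Int × PySem.Dict Int Int × List Int) (q : List Int) :
    PySem.Dict Int Int × PySem.Dict Int Int × List Int :=
  match q with
  | [ball, color] =>
    let balls := st.1
    let colors := st.2.1
    let res := st.2.2
    if balls.contains ball then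
      -- balls[ball]: get? is some here (guarded by `ball in balls`), so the default is unreachable
      let old_color : Int := (balls.get? ball).getD 0
      let balls1 := balls.insert ball color
      let colors1 := colors.insert color (colors.getD color 0 + 1)
      -- colors.get(old_color): some (never None) on every state the loop reaches, so `.getD 0` is exact
      let colors2 := colors1.insert old_color ((colors1.get? old_color).getD 0 - 1)
      let colors3 := if colors2.getD old_color 0 == 0 then colors2.erase old_color else colors2
      (balls1, colors3, res ++ [(colors3.size : Int)])
    else
      let balls1 := balls.insert ball color
      let colors1 := colors.insert color (colors.getD color 0 + 1)
      (balls1, colors1, res ++ [(colors1.size : Int)])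
  | _ => st  -- Python raises ValueError unpacking here; such queries are excluded by Pre_

def queryResults (limit : Int) (queries : List (List Int)) : List Int :=
  (queries.foldl pvStepA (PySem.Dict.empty, PySem.Dict.empty, [])).2.2

-- ===== PORT B =====
-- loop body of B, over the state (balls, res)
def pvStepB (st : PySem.Dict Int Int × List Int) (q : List Int) :
    PySem.Dict Int Int × List Int :=
  match q with
  | [ball, color] =>
    let balls := st.1.insert ball color
    (balls, st.2 ++ [((PySem.Set.ofList balls.values).length : Int)])
  | _ => st  -- Python raises ValueError unpacking here; such queries are excluded by Pre_

def queryResults_alt (limit : Int) (queries : List (List Int)) : List Int :=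
  (queries.foldl pvStepB (PySem.Dict.empty, [])).2

-- ===== PRECONDITION & SPEC =====
-- Pre_ excludes exactly the queries on which Python's `for ball, color in queries` raises
-- ValueError (an inner list whose length is not 2); A returns normally on everything else.
def Pre_queryResults (limit : Int) (queries : List (List Int)) : Prop :=
  ∀ q ∈ queries, q.length = 2
instance (limit : Int) (queries : List (List Int)) : Decidable (Pre_queryResults limit queries) := by
  unfold Pre_queryResults; infer_instance

def pvWitness_queryResults : Int × List (List Int) := (4, [[0, 1], [1, 2], [0, 2]])

def Spec_queryResults (limit : Int) (queries : List (List Int)) (out : List Int) : Prop :=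
  out = queryResults_alt limit queries
instance (limit : Int) (queries : List (List Int)) (out : List Int) :
    Decidable (Spec_queryResults limit queries out) := by unfold Spec_queryResults; infer_instance

-- ===== CLAIM (what is proved, stated in full; the proofs are below) =====
def Claim_equal_queryResults : Prop :=
  ∀ (limit : Int) (queries : List (List Int)), Dom_queryResults limit queries →
    Pre_queryResults limit queries →
    Spec_queryResults limit queries (queryResults limit queries)

-- ===== LEMMAS AND PROOFS =====

-- The loop invariant relating A's `colors` dict to the current `balls` dict.
def pvInv (balls colors : PySem.Dict Int Int) : Prop :=
  balls.keys.Nodup ∧ colors.keys.Nodup ∧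
  (∀ x : Int, colors.getD x 0 = (balls.values.count x : Int)) ∧
  (∀ x : Int, x ∈ colors.keys ↔ x ∈ balls.values)

-- A's colors update for one query, isolated from the loop plumbing
def pvNewColors (balls colors : PySem.Dict Int Int) (b c : Int) : PySem.Dict Int Int :=
  if balls.contains b then
    let old := (balls.get? b).getD 0
    let c1 := colors.insert c (colors.getD c 0 + 1)
    let c2 := c1.insert old ((c1.get? old).getD 0 - 1)
    if c2.getD old 0 == 0 then c2.erase old else c2
  else colors.insert c (colors.getD c 0 + 1)

lemma pvStepA_eq (balls colors : PySem.Dict Int Int) (res : List Int) (b c : Int) :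
    pvStepA (balls, colors, res) [b, c] =
      (balls.insert b c, pvNewColors balls colors b c,
        res ++ [((pvNewColors balls colors b c).size : Int)]) := by
  simp only [pvStepA, pvNewColors]
  split <;> rfl

lemma pv_keys_erase (d : PySem.Dict Int Int) (k : Int) :
    (d.erase k).keys = d.keys.filter (fun a => !(a == k)) := by
  obtain ⟨l⟩ := d
  induction l with
  | nil => rfl
  | cons p t ih =>
    simp only [PySem.Dict.erase, PySem.Dict.keys, List.filter_cons, List.map_cons] at *
    by_cases h : (p.1 == k) = true <;> simp [h] at * <;> simp [ih]

lemma pv_find_filter (l : List (Int × Int)) (k x : Int) :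
    (l.filter (fun p => !(p.1 == k))).find? (fun p => p.1 == x)
      = if x = k then none else l.find? (fun p => p.1 == x) := by
  induction l with
  | nil => simp
  | cons p t ih =>
    by_cases h1 : (p.1 == k) = true
    · have h1' : p.1 = k := beq_iff_eq.mp h1
      by_cases hxk : x = k
      · simp [List.filter_cons, h1, ih, hxk]
      · have h2 : (p.1 == x) = false := by
          rw [beq_eq_false_iff_ne, h1']; exact fun he => hxk he.symm
        simp [List.filter_cons, h1, List.find?_cons, h2, ih, hxk]
    · by_cases hxk : x = k
      · have h2 : (p.1 == x) = false := by
          rw [beq_eq_false_iff_ne, hxk]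
          intro he; rw [he] at h1; simp at h1
        simp [List.filter_cons, h1, List.find?_cons, h2, ih, hxk]
      · by_cases h2 : (p.1 == x) = true
        · simp [List.filter_cons, h1, List.find?_cons, h2, hxk]
        · simp [List.filter_cons, h1, List.find?_cons, h2, ih, hxk]

lemma pv_getD_erase (d : PySem.Dict Int Int) (k x : Int) :
    (d.erase k).getD x 0 = if x = k then 0 else d.getD x 0 := by
  simp only [PySem.Dict.getD, PySem.Dict.get?, PySem.Dict.erase, pv_find_filter]
  split <;> simp

lemma pv_count_map_replace (l : List (Int × Int)) (b old c x : Int)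
    (hnd : (l.map Prod.fst).Nodup) (h : (b, old) ∈ l) :
    ((l.map (fun p => if (p.1 == b) = true then (b, c) else p)).map Prod.snd).count x
        + (if x = old then 1 else 0)
      = (l.map Prod.snd).count x + (if x = c then 1 else 0) := by
  induction l with
  | nil => simp at h
  | cons p t ih =>
    simp only [List.map_cons, List.nodup_cons] at hnd
    rcases List.mem_cons.mp h with hp | hp
    · subst hp
      have htid : t.map (fun q => if (q.1 == b) = true then (b, c) else q) = t := by
        have hall : ∀ q ∈ t, (if (q.1 == b) = true then (b, c) else q) = q := by
          intro q hq2
          have hq1 : q.1 ∈ t.map Prod.fst := List.mem_map.mpr ⟨q, hq2, rfl⟩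
          have hqb : (q.1 == b) = false := by
            rw [beq_eq_false_iff_ne]
            intro he; apply hnd.1; rw [← he]; exact hq1
          simp [hqb]
        rw [List.map_congr_left (g := id) hall, List.map_id]
      simp only [List.map_cons, htid]
      rw [if_pos (by simp : ((((b, old) : Int × Int).1 == b) = true))]
      simp only [List.map_cons, List.count_cons, beq_iff_eq]
      split_ifs <;> omega
    · have hb : b ∈ t.map Prod.fst := List.mem_map.mpr ⟨(b, old), hp, rfl⟩
      have hpb : ¬((p.1 == b) = true) := by
        simp only [beq_iff_eq]
        intro he; apply hnd.1; rw [he]; exact hb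
      have hih := ih hnd.2 hp
      simp only [List.map_cons, if_neg hpb, List.count_cons]
      split_ifs at hih ⊢ <;> omega

lemma pv_count_values_insert (d : PySem.Dict Int Int) (b old c x : Int)
    (hnd : d.keys.Nodup) (h : d.get? b = some old) :
    (d.insert b c).values.count x + (if x = old then 1 else 0)
      = d.values.count x + (if x = c then 1 else 0) := by
  have hc : d.contains b = true := by rw [PySem.Dict.contains_eq_isSome_get?, h]; rfl
  have hm : (b, old) ∈ d.items := PySem.Dict.mem_items_of_get?_eq_some d h
  rw [PySem.Dict.values, PySem.Dict.items_insert_of_contains d c hc]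
  exact pv_count_map_replace d.items b old c x hnd hm

lemma pv_values_insert_not_contains (d : PySem.Dict Int Int) (b c : Int)
    (h : d.contains b = false) : (d.insert b c).values = d.values ++ [c] := by
  rw [PySem.Dict.values, PySem.Dict.items_insert_of_not_contains d c h]
  simp [PySem.Dict.values]

lemma pv_getD_eq_get?_getD (d : PySem.Dict Int Int) (k : Int) :
    (d.get? k).getD 0 = d.getD k 0 := rfl

lemma pv_inv_newColors (balls colors : PySem.Dict Int Int) (b c : Int)
    (h : pvInv balls colors) :
    pvInv (balls.insert b c) (pvNewColors balls colors b c) := by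
  obtain ⟨hbn, hcn, hcount, hmem⟩ := h
  have hmcount : ∀ (l : List Int) (y : Int), y ∈ l ↔ 0 < l.count y :=
    fun l y => List.count_pos_iff.symm
  have hbn' : (balls.insert b c).keys.Nodup := PySem.Dict.nodup_keys_insert _ _ _ hbn
  by_cases hc : balls.contains b = true
  · -- ball already present: colors gets +1 at the new color, -1 at the old one
    obtain ⟨old, hold⟩ : ∃ old, balls.get? b = some old := by
      rw [PySem.Dict.contains_eq_isSome_get?] at hc
      exact Option.isSome_iff_exists.mp hc
    have hrel : ∀ x : Int, (balls.insert b c).values.count x + (if x = old then 1 else 0)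
        = balls.values.count x + (if x = c then 1 else 0) :=
      fun x => pv_count_values_insert balls b old c x hbn hold
    set c1 := colors.insert c (colors.getD c 0 + 1) with hc1
    set c2 := c1.insert old ((c1.get? old).getD 0 - 1) with hc2
    have hC2 : ∀ x : Int, c2.getD x 0 = ((balls.insert b c).values.count x : Int) := by
      intro x
      have hx := hrel x
      rw [hc2, pv_getD_eq_get?_getD, hc1]
      simp only [PySem.Dict.getD_insert, hcount]
      rcases eq_or_ne x old with h1 | h1
      · subst h1
        rcases eq_or_ne x c with h2 | h2
        · subst h2
          simp at hx ⊢
          omega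
        · rw [if_pos rfl, if_neg h2]
          rw [if_pos rfl, if_neg h2] at hx
          omega
      · rw [if_neg h1]
        rw [if_neg h1] at hx
        rcases eq_or_ne x c with h2 | h2
        · subst h2
          rw [if_pos rfl]
          rw [if_pos rfl] at hx
          omega
        · rw [if_neg h2]
          rw [if_neg h2] at hx
          omega
    have hC2n : c2.keys.Nodup :=
      PySem.Dict.nodup_keys_insert _ _ _ (PySem.Dict.nodup_keys_insert _ _ _ hcn)
    have hC2mem : ∀ x : Int, x ∈ c2.keys ↔ (x = old ∨ x = c ∨ x ∈ balls.values) := by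
      intro x
      rw [hc2, PySem.Dict.mem_keys_insert, hc1, PySem.Dict.mem_keys_insert, hmem x]
    have hval : pvNewColors balls colors b c
        = if c2.getD old 0 == 0 then c2.erase old else c2 := by
      simp only [pvNewColors, if_pos hc, hold]
      rfl
    rw [hval]
    by_cases hz : (c2.getD old 0 == 0) = true
    · -- old color's count dropped to zero: A deletes the key
      have hzn : (balls.insert b c).values.count old = 0 := by
        have := beq_iff_eq.mp hz
        rw [hC2 old] at this
        exact_mod_cast this
      rw [if_pos hz]
      refine ⟨hbn', ?_, ?_, ?_⟩
      · rw [pv_keys_erase]; exact hC2n.filter _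
      · intro x
        rw [pv_getD_erase]
        split_ifs with hxo
        · subst hxo; omega
        · exact hC2 x
      · intro x
        rw [pv_keys_erase, List.mem_filter, hmcount (balls.insert b c).values x]
        have hx := hrel x
        constructor
        · rintro ⟨hk, hne⟩
          have hxo : x ≠ old := by simpa using hne
          rcases (hC2mem x).mp hk with h1 | h1 | h1
          · exact absurd h1 hxo
          · subst h1
            rw [if_neg hxo, if_pos rfl] at hx
            omega
          · have h1' := (hmcount balls.values x).mp h1
            rw [if_neg hxo] at hx
            split_ifs at hx <;> omega
        · intro hcnt
          have hxo : x ≠ old := by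
            intro he; rw [he] at hcnt; omega
          refine ⟨(hC2mem x).mpr ?_, by simpa using hxo⟩
          rcases eq_or_ne x c with hxc' | hxc'
          · exact Or.inr (Or.inl hxc')
          · refine Or.inr (Or.inr ((hmcount balls.values x).mpr ?_))
            rw [if_neg hxo, if_neg hxc'] at hx
            omega
    · -- old color still present
      rw [if_neg hz]
      have hz' : (balls.insert b c).values.count old ≠ 0 := by
        intro h0
        apply hz
        rw [beq_iff_eq, hC2 old, h0]
        simp
      refine ⟨hbn', hC2n, hC2, ?_⟩
      intro x
      rw [hC2mem x, hmcount (balls.insert b c).values x]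
      have hx := hrel x
      constructor
      · rintro (h1 | h1 | h1)
        · subst h1; omega
        · rcases eq_or_ne x old with h2 | h2
          · subst h2; omega
          · subst h1
            rw [if_neg h2, if_pos rfl] at hx
            omega
        · rcases eq_or_ne x old with h2 | h2
          · subst h2; omega
          · have h1' := (hmcount balls.values x).mp h1
            rw [if_neg h2] at hx
            split_ifs at hx <;> omega
      · intro hcnt
        rcases eq_or_ne x old with hxo | hxo
        · exact Or.inl hxo
        rcases eq_or_ne x c with hxc' | hxc'
        · exact Or.inr (Or.inl hxc')
        refine Or.inr (Or.inr ((hmcount balls.values x).mpr ?_))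
        rw [if_neg hxo, if_neg hxc'] at hx
        omega
  · -- new ball: one value appended, one count incremented
    have hc' : balls.contains b = false := by simpa using hc
    have hvals : (balls.insert b c).values = balls.values ++ [c] :=
      pv_values_insert_not_contains balls b c hc'
    have hval : pvNewColors balls colors b c = colors.insert c (colors.getD c 0 + 1) := by
      simp only [pvNewColors, hc']
      rfl
    rw [hval]
    refine ⟨hbn', PySem.Dict.nodup_keys_insert _ _ _ hcn, ?_, ?_⟩
    · intro x
      rw [PySem.Dict.getD_insert, hvals, List.count_append]
      rcases eq_or_ne x c with h1 | h1
      · subst h1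
        rw [if_pos rfl, hcount x]
        simp [List.count_cons]
      · rw [if_neg h1, hcount x]
        have : ([c].count x) = 0 := by
          simp [List.count_cons, beq_iff_eq]
          omega
        rw [this]
        simp
    · intro x
      rw [PySem.Dict.mem_keys_insert, hvals, List.mem_append, List.mem_singleton, hmem x]
      tauto

lemma pv_size_eq (balls colors : PySem.Dict Int Int) (h : pvInv balls colors) :
    colors.size = (PySem.Set.ofList balls.values).length := by
  obtain ⟨_, hcn, _, hmem⟩ := h
  have hp : colors.keys.Perm (PySem.Set.ofList balls.values) := by
    rw [List.perm_ext_iff_of_nodup hcn (PySem.Set.nodup_ofList _)]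
    intro a
    rw [hmem a, PySem.Set.mem_ofList]
  have := hp.length_eq
  simpa [PySem.Dict.size, PySem.Dict.keys] using this

lemma pv_loop_eq (qs : List (List Int)) (balls colors : PySem.Dict Int Int) (res : List Int)
    (hq : ∀ q ∈ qs, q.length = 2) (hinv : pvInv balls colors) :
    (qs.foldl pvStepA (balls, colors, res)).2.2 = (qs.foldl pvStepB (balls, res)).2 := by
  induction qs generalizing balls colors res with
  | nil => rfl
  | cons q t ih =>
    have hlen : q.length = 2 := hq q (List.mem_cons_self ..)
    obtain ⟨b, c, rfl⟩ : ∃ b c, q = [b, c] := by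
      match q, hlen with
      | [b, c], _ => exact ⟨b, c, rfl⟩
    have hinv' := pv_inv_newColors balls colors b c hinv
    have hsz := pv_size_eq (balls.insert b c) (pvNewColors balls colors b c) hinv'
    simp only [List.foldl_cons, pvStepA_eq, pvStepB, hsz]
    exact ih _ _ _ (fun q hq' => hq q (List.mem_cons_of_mem _ hq')) hinv'

lemma pv_inv_empty : pvInv PySem.Dict.empty PySem.Dict.empty := by
  refine ⟨?_, ?_, ?_, ?_⟩ <;> simp [PySem.Dict.empty, PySem.Dict.keys, PySem.Dict.getD,
    PySem.Dict.get?, PySem.Dict.values]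

-- ===== VERDICT (by name: the statement is the Claim_ definition above) =====
theorem queryResults_spec : Claim_equal_queryResults := by
  intro limit queries _ hpre
  show queryResults limit queries = queryResults_alt limit queries
  unfold queryResults queryResults_alt
  exact pv_loop_eq queries _ _ [] hpre pv_inv_empty
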